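-- pv_equiv track=rewrite | github.com/Dataram57/ethuardo_docs | remote_push.py | dim_hashes_to_array
-- ===== SOURCE A (Python) =====
-- def dim_hashes_to_array(txt):
--     arr = []
--     i = -1
--     f = txt.index(';')
--     while f > -1:
--         arr.append(txt[i + 1:f].replace("\n",'').split(','))
--         arr[-1][0] = arr[-1][0].strip()
--         i = f
--         try:
--             f = txt.index(';', i + 1)
--         except:
--             break
--     return arr
-- ===== SOURCE B (Python) =====
-- def dim_hashes_to_array(txt):
--     rows = []
--     for chunk in txt.split(';')[:-1]:
--         cells = chunk.replace('\n', '').split(',')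
--         rows.append([cells[0].strip()] + cells[1:])
--     return rows
-- ===== Notes on version B (the rewrite author's own statement) =====
-- stated objective: idiomatic
-- what changed: B replaces A's incremental index-based scan with absolute-index state by a single up-front split on the semicolon separator followed by one straight pass over the chunks before the last separator; inputs without a separator (A raises ValueError, outside Pre_) get an empty result from B.
import Mathlib
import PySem

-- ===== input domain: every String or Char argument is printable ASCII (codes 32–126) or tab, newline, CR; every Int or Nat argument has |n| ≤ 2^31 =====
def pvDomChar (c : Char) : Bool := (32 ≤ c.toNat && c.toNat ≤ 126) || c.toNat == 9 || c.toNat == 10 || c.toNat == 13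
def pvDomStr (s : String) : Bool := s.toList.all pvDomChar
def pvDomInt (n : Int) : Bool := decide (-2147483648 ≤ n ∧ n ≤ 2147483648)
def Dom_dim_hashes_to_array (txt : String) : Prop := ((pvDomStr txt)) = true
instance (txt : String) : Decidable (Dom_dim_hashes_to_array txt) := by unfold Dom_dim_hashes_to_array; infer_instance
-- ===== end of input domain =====

-- B replaces A's incremental index-based scan by one up-front split on the semicolon separator
-- plus a straight pass over the chunks before the last separator (objective: idiomatic; same O(n) cost).

-- ===== PORT A =====
-- the while loop: state (i, f); txt.index raising = findFrom returning -1 (the break);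
-- fuel bounds the number of iterations (each moves i past a separator, so txt.length + 1 suffices)
def dimALoop (txt : String) : Nat → Int → Int → List (List String) → List (List String)
  | 0, _, _, arr => arr
  | fuel + 1, i, f, arr =>
    if f > -1 then
      let row := (PySem.Str.split? (PySem.Str.replace (PySem.Str.slice txt (some (i + 1)) (some f)) "\n" "") ",").getD []
      let row := PySem.List.pySetD row 0 (PySem.Str.strip (PySem.List.pyGetD row 0 ""))
      let arr := arr ++ [row]
      let f' := PySem.Str.findFrom txt ";" (f + 1)
      if f' = -1 then arr else dimALoop txt fuel f f' arr
    else arr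

def dim_hashes_to_array (txt : String) : List (List String) :=
  -- Python's txt.index call raises where find returns -1; those inputs are outside Pre_
  dimALoop txt (txt.length + 1) (-1) (PySem.Str.find txt ";") []

-- ===== PORT B =====
def dim_hashes_to_array_alt (txt : String) : List (List String) :=
  (PySem.List.slice ((PySem.Str.split? txt ";").getD []) none (some (-1))).foldl
    (fun rows chunk =>
      let cells := (PySem.Str.split? (PySem.Str.replace chunk "\n" "") ",").getD []
      rows ++ [match cells with
               | [] => []            -- unreachable: a split result is never empty
               | c :: r => PySem.Str.strip c :: r]) []

-- ===== PRECONDITION & SPEC =====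
-- Pre_ excludes exactly the inputs with no semicolon, on which Python A raises ValueError
def Pre_dim_hashes_to_array (txt : String) : Prop := PySem.Str.isIn ";" txt = true
instance (txt : String) : Decidable (Pre_dim_hashes_to_array txt) := by unfold Pre_dim_hashes_to_array; infer_instance
def pvWitness_dim_hashes_to_array : String := "a,b;c;"

def Spec_dim_hashes_to_array (txt : String) (out : List (List String)) : Prop := out = dim_hashes_to_array_alt txt
instance (txt : String) (out : List (List String)) : Decidable (Spec_dim_hashes_to_array txt out) := by unfold Spec_dim_hashes_to_array; infer_instance

-- ===== CLAIM (what is proved, stated in full; the proofs are below) =====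
def Claim_equal_dim_hashes_to_array : Prop := ∀ (txt : String), Dom_dim_hashes_to_array txt → Pre_dim_hashes_to_array txt → Spec_dim_hashes_to_array txt (dim_hashes_to_array txt)

-- ===== LEMMAS AND PROOFS =====

-- structural model of s.split(c) for a one-character separator
def sp (c : Char) : List Char → List (List Char)
  | [] => [[]]
  | a :: t => if a = c then [] :: sp c t else (a :: (sp c t).headD []) :: (sp c t).tail

theorem sp_ne_nil (c : Char) (l : List Char) : sp c l ≠ [] := by
  cases l with
  | nil => simp [sp]
  | cons a t => simp only [sp]; split <;> simp

-- prepend x onto the head part (splitOn.go's pending-piece recomposition)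
def consHead (x : List Char) : List (List Char) → List (List Char)
  | [] => [x]
  | h :: t => (x ++ h) :: t

theorem splitOn_go_eq (c : Char) : ∀ (fuel : Nat) (l cur : List Char) (acc : List (List Char)),
    l.length < fuel →
    PySem.Chars.splitOn.go [c] fuel l cur acc = acc.reverse ++ consHead cur.reverse (sp c l) := by
  intro fuel
  induction fuel with
  | zero => intro l cur acc h; omega
  | succ n ih =>
    intro l cur acc h
    cases l with
    | nil => simp [PySem.Chars.splitOn.go, sp, consHead]
    | cons a t =>
      by_cases hac : a = c
      · subst hac
        rw [show PySem.Chars.splitOn.go [a] (n+1) (a::t) cur acc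
              = PySem.Chars.splitOn.go [a] n t [] (cur.reverse :: acc) from by
            simp [PySem.Chars.splitOn.go]]
        rw [ih t [] (cur.reverse :: acc) (by simp at h ⊢; omega)]
        simp [sp]
        cases hsp : sp a t with
        | nil => exact absurd hsp (sp_ne_nil a t)
        | cons u us => simp [consHead]
      · rw [show PySem.Chars.splitOn.go [c] (n+1) (a::t) cur acc
              = PySem.Chars.splitOn.go [c] n t (a :: cur) acc from by
            simp [PySem.Chars.splitOn.go, List.isPrefixOf]
            intro hh; exact absurd hh.symm hac]
        rw [ih t (a :: cur) acc (by simp at h ⊢; omega)]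
        simp [sp, hac]
        cases hsp : sp c t with
        | nil => exact absurd hsp (sp_ne_nil c t)
        | cons u us => simp [consHead]

theorem splitOn_eq_sp (c : Char) (l : List Char) : PySem.Chars.splitOn l [c] = sp c l := by
  unfold PySem.Chars.splitOn
  rw [splitOn_go_eq c (l.length + 1) l [] [] (by omega)]
  cases hsp : sp c l with
  | nil => exact absurd hsp (sp_ne_nil c l)
  | cons u us => simp [consHead]

theorem sp_of_not_mem {c : Char} {l : List Char} (h : c ∉ l) : sp c l = [l] := by
  induction l with
  | nil => simp [sp]
  | cons a t ih =>
    simp at h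
    simp [sp, Ne.symm h.1, ih h.2]

theorem sp_step {c : Char} : ∀ (l : List Char) (j : Nat) (hj : j < l.length),
    l[j] = c → (∀ i (hi : i < j), l[i]'(by omega) ≠ c) →
    sp c l = l.take j :: sp c (l.drop (j + 1)) := by
  intro l
  induction l with
  | nil => intro j hj; simp at hj
  | cons a t ih =>
    intro j hj hc hmin
    cases j with
    | zero => simp at hc; simp [sp, hc]
    | succ j =>
      have ha : a ≠ c := hmin 0 (by omega)
      simp at hc
      have := ih j (by simp at hj; omega) hc (fun i hi => by
        have := hmin (i+1) (by omega); simpa using this)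
      simp [sp, ha, this]

theorem not_mem_of_find_neg {c : Char} {l : List Char} (h : PySem.Chars.find l [c] = -1) : c ∉ l := by
  intro hm
  rw [PySem.Chars.find_eq_neg_one_iff] at h
  obtain ⟨s, t, rfl⟩ := List.append_of_mem hm
  exact h ⟨s, t, by simp⟩

theorem find_first {c : Char} {l : List Char} (h : ¬ PySem.Chars.find l [c] = -1) :
    ∃ j : Nat, PySem.Chars.find l [c] = (j : Int) ∧ ∃ hj : j < l.length,
      l[j] = c ∧ ∀ i (hi : i < j), l[i]'(by omega) ≠ c := by
  have h0 : 0 ≤ PySem.Chars.find l [c] := by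
    have := PySem.Chars.neg_one_le_find l [c]
    omega
  obtain ⟨hpre, hmin⟩ := PySem.Chars.find_spec h0
  set j := (PySem.Chars.find l [c]).toNat with hj
  refine ⟨j, by omega, ?_⟩
  obtain ⟨t, ht⟩ := hpre
  have hdrop : l.drop j = c :: t := ht.symm
  have hjlen : j < l.length := by
    have : (l.drop j).length = (c :: t).length := by rw [hdrop]
    simp at this
    omega
  refine ⟨hjlen, ?_, ?_⟩
  · have h0' : (l.drop j)[0]'(by rw [hdrop]; simp) = c := by simp [hdrop]
    simpa using h0'.symm.trans (by simp) |>.symm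
  · intro i hi hci
    refine hmin i hi ⟨l.drop (i+1), ?_⟩
    have : l.drop i = c :: l.drop (i+1) := by
      rw [List.drop_eq_getElem_cons (by omega), hci]
    rw [this]; rfl

-- the row built from one chunk, at char level
def procC (chunk : List Char) : List String :=
  match sp ',' (PySem.Chars.replace chunk ['\n'] []) with
  | [] => []
  | c :: r => String.ofList (PySem.Chars.strip c) :: r.map String.ofList

theorem split_semi (s : String) :
    (PySem.Str.split? s ";").getD [] = (sp ';' s.toList).map String.ofList := by
  simp [PySem.Str.split?, PySem.Chars.split?, splitOn_eq_sp]

theorem strip_ofList (c : List Char) :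
    PySem.Str.strip (String.ofList c) = String.ofList (PySem.Chars.strip c) := by
  have h := PySem.Str.toList_strip (String.ofList c)
  rw [String.toList_ofList] at h
  rw [← h, String.ofList_toList]

theorem split_comma_replace (chunk : List Char) :
    (PySem.Str.split? (PySem.Str.replace (String.ofList chunk) "\n" "") ",").getD []
      = (sp ',' (PySem.Chars.replace chunk ['\n'] [])).map String.ofList := by
  simp [PySem.Str.split?, PySem.Chars.split?, splitOn_eq_sp, PySem.Str.toList_replace]

theorem row_eq (chunk : List Char) :
    PySem.List.pySetD (((PySem.Str.split? (PySem.Str.replace (String.ofList chunk) "\n" "") ",").getD [])) 0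
        (PySem.Str.strip (PySem.List.pyGetD (((PySem.Str.split? (PySem.Str.replace (String.ofList chunk) "\n" "") ",").getD [])) 0 ""))
      = procC chunk := by
  rw [split_comma_replace]
  unfold procC
  cases hsp : sp ',' (PySem.Chars.replace chunk ['\n'] []) with
  | nil => exact absurd hsp (sp_ne_nil _ _)
  | cons c r =>
    simp [PySem.List.pySetD, PySem.List.pySet?, PySem.List.pyGetD, PySem.List.pyGet?, PySem.List.pyIdx?,
      strip_ofList]

theorem rowB_eq (chunk : List Char) :
    (match (PySem.Str.split? (PySem.Str.replace (String.ofList chunk) "\n" "") ",").getD [] with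
     | [] => ([] : List String)
     | c :: r => PySem.Str.strip c :: r) = procC chunk := by
  rw [split_comma_replace]
  unfold procC
  cases hsp : sp ',' (PySem.Chars.replace chunk ['\n'] []) with
  | nil => exact absurd hsp (sp_ne_nil _ _)
  | cons c r => simp [strip_ofList]

theorem loop_eq (txt : String) : ∀ (fuel k : Nat) (arr : List (List String)),
    k ≤ txt.toList.length → txt.toList.length - k < fuel →
    dimALoop txt fuel ((k : Int) - 1) (PySem.Chars.findFrom txt.toList [';'] (k : Int) none) arr
      = arr ++ (sp ';' (txt.toList.drop k)).dropLast.map procC := by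
  intro fuel
  induction fuel with
  | zero => intro k arr hk hf; omega
  | succ n ih =>
    intro k arr hk hf
    rw [PySem.Chars.findFrom_natCast txt.toList [';'] k hk]
    by_cases hfind : PySem.Chars.find (txt.toList.drop k) [';'] = -1
    · rw [if_pos hfind]
      rw [sp_of_not_mem (not_mem_of_find_neg hfind)]
      simp [dimALoop]
    · rw [if_neg hfind]
      obtain ⟨j, hjval, hjlt, hjc, hjmin⟩ := find_first hfind
      have hkj : k + j < txt.toList.length := by
        have := hjlt
        rw [List.length_drop] at this
        omega
      rw [hjval]
      -- unfold one loop iteration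
      simp only [dimALoop]
      rw [if_pos (by omega : ((k : Int) + (j : Int)) > -1)]
      -- the chunk txt[i+1 : f]
      have hchunk : (PySem.Str.slice txt (some (((k : Int) - 1) + 1)) (some ((k : Int) + (j : Int))))
          = String.ofList ((txt.toList.drop k).take j) := by
        have h1 : ((k : Int) - 1) + 1 = (k : Int) := by ring
        rw [h1]
        have h2 : (PySem.Str.slice txt (some (k : Int)) (some ((k : Int) + (j : Int)))).toList
            = (txt.toList.drop k).take j := by
          rw [PySem.Str.toList_slice, PySem.Chars.slice_eq_listSlice,
            PySem.List.slice_natCast_add]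
        rw [← h2, String.ofList_toList]
      rw [hchunk, row_eq]
      -- split the first piece off sp
      have hsplit : sp ';' (txt.toList.drop k)
          = (txt.toList.drop k).take j :: sp ';' (txt.toList.drop (k + j + 1)) := by
        have := sp_step (txt.toList.drop k) j hjlt hjc hjmin
        rw [this, List.drop_drop]
        ring_nf
      have hrhs : (sp ';' (txt.toList.drop k)).dropLast.map procC
          = procC ((txt.toList.drop k).take j)
            :: (sp ';' (txt.toList.drop (k + j + 1))).dropLast.map procC := by
        rw [hsplit, List.dropLast_cons_of_ne_nil (sp_ne_nil _ _)]
        simp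
      rw [hrhs]
      -- the next search starts at k + j + 1
      have hnext : PySem.Str.findFrom txt ";" (((k : Int) + (j : Int)) + 1)
          = PySem.Chars.findFrom txt.toList [';'] ((k + j + 1 : Nat) : Int) none := by
        rw [PySem.Str.findFrom_eq]
        norm_num
        push_cast
        ring_nf
      rw [hnext]
      by_cases hstop : PySem.Chars.findFrom txt.toList [';'] ((k + j + 1 : Nat) : Int) none = -1
      · rw [if_pos hstop]
        rw [PySem.Chars.findFrom_natCast txt.toList [';'] (k + j + 1) (by omega)] at hstop
        by_cases h2 : PySem.Chars.find (txt.toList.drop (k + j + 1)) [';'] = -1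
        · rw [sp_of_not_mem (not_mem_of_find_neg h2)]
          simp
        · rw [if_neg h2] at hstop
          have := PySem.Chars.neg_one_le_find (txt.toList.drop (k + j + 1)) [';']
          omega
      · rw [if_neg hstop]
        have hrec := ih (k + j + 1) (arr ++ [procC ((txt.toList.drop k).take j)])
          (by omega) (by omega)
        rw [show ((k + j + 1 : Nat) : Int) - 1 = (k : Int) + (j : Int) from by push_cast; ring] at hrec
        rw [hrec]
        simp

theorem alt_eq (txt : String) :
    dim_hashes_to_array_alt txt = (sp ';' txt.toList).dropLast.map procC := by
  unfold dim_hashes_to_array_alt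
  rw [split_semi, PySem.List.slice_to_neg_one, ← List.map_dropLast]
  rw [PySem.List.foldl_append_singleton_eq_map]
  rw [List.map_map]
  refine List.map_congr_left ?_
  intro chunkC _
  simpa using rowB_eq chunkC

-- ===== VERDICT (by name: the statement is the Claim_ definition above) =====
theorem dim_hashes_to_array_spec : Claim_equal_dim_hashes_to_array := by
  intro txt _ _
  unfold Spec_dim_hashes_to_array dim_hashes_to_array
  have h := loop_eq txt (txt.length + 1) 0 [] (by simp) (by simp)
  simp only [Nat.cast_zero, zero_sub, List.drop_zero, List.nil_append] at h
  rw [alt_eq]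
  rw [← h]
  simp [PySem.Str.find_eq, PySem.Chars.findFrom_zero]
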